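-- pv_equiv track=rewrite | github.com/Shashwat-Gupta57/Jmap | Jctx.py | _kt_strip_modifiers
-- ===== SOURCE A (Python) =====
-- KT_MODIFIERS = {
--     'public', 'private', 'protected', 'internal',
--     'open', 'final', 'abstract', 'sealed',
--     'override', 'inline', 'noinline', 'crossinline',
--     'suspend', 'tailrec', 'operator', 'infix', 'external',
--     'const', 'lateinit', 'actual', 'expect', 'annotation',
--     'inner', 'companion',
-- }
--
-- def _kt_strip_modifiers(tokens):
--     """
--     Remove leading Kotlin modifier keywords and annotations from a token list.
--     """
--     out = []
--     skip = True
--     for tok in tokens: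
--         if skip and (tok in KT_MODIFIERS or tok.startswith('@')):
--             continue
--         skip = False
--         out.append(tok)
--     return out
-- ===== SOURCE B (Python) =====
-- KT_MODIFIERS = {
--     'public', 'private', 'protected', 'internal',
--     'open', 'final', 'abstract', 'sealed',
--     'override', 'inline', 'noinline', 'crossinline',
--     'suspend', 'tailrec', 'operator', 'infix', 'external',
--     'const', 'lateinit', 'actual', 'expect', 'annotation',
--     'inner', 'companion',
-- }
--
-- def _kt_strip_modifiers(tokens):
--     """
--     Remove leading Kotlin modifier keywords and annotations from a token list.
--     """
--     cut = len(tokens)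
--     for i, tok in enumerate(tokens):
--         if not (tok in KT_MODIFIERS or tok.startswith('@')):
--             cut = i
--             break
--     return tokens[cut:]
-- ===== Notes on version B (the rewrite author's own statement) =====
-- stated objective: alternative
-- what changed: Instead of A's skip-flag loop that copies kept tokens into an accumulator, B first computes the cut index (the first position whose token is not a modifier/annotation) with an early-break scan and then returns the single slice tokens[cut:].
import Mathlib
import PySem

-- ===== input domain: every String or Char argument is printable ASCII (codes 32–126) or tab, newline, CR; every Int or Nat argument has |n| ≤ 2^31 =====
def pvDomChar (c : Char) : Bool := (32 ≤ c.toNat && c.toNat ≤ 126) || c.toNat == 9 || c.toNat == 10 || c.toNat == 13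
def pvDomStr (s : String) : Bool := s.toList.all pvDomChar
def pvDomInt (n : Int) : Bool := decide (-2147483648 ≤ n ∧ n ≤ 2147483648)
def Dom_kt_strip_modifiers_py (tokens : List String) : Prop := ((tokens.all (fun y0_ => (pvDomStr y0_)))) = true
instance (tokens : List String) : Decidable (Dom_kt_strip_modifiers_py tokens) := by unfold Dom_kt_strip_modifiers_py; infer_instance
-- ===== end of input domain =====

-- B computes the cut index of the first non-modifier token and returns one slice, instead of A's skip-flag accumulator loop (alternative decomposition, same cost).

-- ===== PORT A =====
def ktModifiers : PySem.Set String := PySem.Set.ofList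
  ["public", "private", "protected", "internal",
   "open", "final", "abstract", "sealed",
   "override", "inline", "noinline", "crossinline",
   "suspend", "tailrec", "operator", "infix", "external",
   "const", "lateinit", "actual", "expect", "annotation",
   "inner", "companion"]

def kt_strip_modifiers_py (tokens : List String) : List String :=
  (tokens.foldl (fun st tok =>
      if st.2 && (ktModifiers.contains tok || PySem.Str.startswith tok "@") then st
      else (st.1 ++ [tok], false))
    (([] : List String), true)).1

-- ===== PORT B =====
-- B's enumerate loop with early break: count how many leading tokens satisfy the
-- predicate; the loop stops (cut := i) at the first token failing it, and cut
-- defaults to len(tokens) when the loop runs out.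
def ktCutIdx : List String → Nat
  | [] => 0
  | t :: ts =>
      if ktModifiers.contains t || PySem.Str.startswith t "@" then ktCutIdx ts + 1
      else 0

-- tokens[cut:] with 0 ≤ cut: Python's tail slice = List.drop (PySem.List.slice_from).
def kt_strip_modifiers_py_alt (tokens : List String) : List String :=
  tokens.drop (ktCutIdx tokens)

-- ===== PRECONDITION & SPEC =====
def Spec_kt_strip_modifiers_py (tokens : List String) (out : List String) : Prop := out = kt_strip_modifiers_py_alt tokens
instance (tokens : List String) (out : List String) : Decidable (Spec_kt_strip_modifiers_py tokens out) := by unfold Spec_kt_strip_modifiers_py; infer_instance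

-- ===== CLAIM =====
def Claim_equal_kt_strip_modifiers_py : Prop := ∀ (tokens : List String), Dom_kt_strip_modifiers_py tokens → Spec_kt_strip_modifiers_py tokens (kt_strip_modifiers_py tokens)

-- ===== LEMMAS AND PROOFS =====

-- once skip is false, A's loop appends every remaining token
theorem pv_foldl_noskip (ts : List String) (acc : List String) :
    (ts.foldl (fun st tok =>
        if st.2 && (ktModifiers.contains tok || PySem.Str.startswith tok "@") then st
        else (st.1 ++ [tok], false))
      (acc, false)) = (acc ++ ts, false) := by
  induction ts generalizing acc with
  | nil => simp
  | cons t ts ih =>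
    rw [List.foldl_cons]
    simp only [Bool.false_and, Bool.false_eq_true, if_false]
    rw [ih]
    simp

theorem pv_main (ts : List String) :
    (ts.foldl (fun st tok =>
        if st.2 && (ktModifiers.contains tok || PySem.Str.startswith tok "@") then st
        else (st.1 ++ [tok], false))
      (([] : List String), true)).1
    = ts.drop (ktCutIdx ts) := by
  induction ts with
  | nil => simp
  | cons t ts ih =>
    rw [List.foldl_cons]
    simp only [Bool.true_and, ktCutIdx]
    by_cases h : (ktModifiers.contains t || PySem.Str.startswith t "@") = true
    · rw [if_pos h, if_pos h, ih]
      simp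
    · rw [if_neg h, if_neg h, pv_foldl_noskip]
      simp

-- ===== VERDICT =====
theorem kt_strip_modifiers_py_spec : Claim_equal_kt_strip_modifiers_py := by
  intro tokens _
  unfold Spec_kt_strip_modifiers_py kt_strip_modifiers_py kt_strip_modifiers_py_alt
  exact pv_main tokens
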